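-- pv_equiv track=rewrite | github.com/baktybekb/algorithms_data_structures | algoexpert/graphs/minimum_passes_of_matrix/bfs_optimal.py | minimumPassesOfMatrix
-- ===== SOURCE A (Python) =====
-- from collections import deque
--
-- def minimumPassesOfMatrix(matrix):
--     rows, cols = len(matrix), len(matrix[0])
--     steps = ((0, 1), (0, -1), (1, 0), (-1, 0))
--
--     def helper(queue, passes):
--         if not queue:
--             return passes
--         for i in range(len(queue)):
--             row, col = queue.popleft()
--             for r, c in steps:
--                 new_row, new_col = row + r, col + c
--                 if not 0 <= new_row < rows or not 0 <= new_col < cols: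
--                     continue
--                 if matrix[new_row][new_col] >= 0:
--                     continue
--                 matrix[new_row][new_col] *= -1
--                 queue.append((new_row, new_col))
--         return helper(queue, passes + 1)
--
--     queue = deque()
--     for row in range(rows):
--         for col in range(cols):
--             if matrix[row][col] <= 0:
--                 continue
--             queue.append((row, col))
--
--     passes = helper(queue, -1)
--     for row in range(rows):
--         for col in range(cols):
--             if matrix[row][col] < 0:
--                 return -1
--     return passes
-- ===== SOURCE B (Python) =====
-- def minimumPassesOfMatrix(matrix):
--     rows, cols = len(matrix), len(matrix[0])
--     frontier = [(r, c) for r in range(rows) for c in range(cols) if matrix[r][c] > 0]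
--     remaining = sum(1 for r in range(rows) for c in range(cols) if matrix[r][c] < 0)
--     converted = set()
--     passes = -1
--     while frontier:
--         nxt = []
--         for row, col in frontier:
--             for nr, nc in ((row, col + 1), (row, col - 1), (row + 1, col), (row - 1, col)):
--                 if 0 <= nr < rows and 0 <= nc < cols and matrix[nr][nc] < 0 and (nr, nc) not in converted:
--                     converted.add((nr, nc))
--                     remaining -= 1
--                     nxt.append((nr, nc))
--         frontier = nxt
--         passes += 1
--     return passes if remaining == 0 else -1
-- ===== Notes on version B (the rewrite author's own statement) =====
-- stated objective: alternative
-- what changed: Replaces the recursive helper that mutates the matrix in place (negating cells) and then rescans the whole matrix with an iterative level-by-level BFS loop that never mutates the input, tracking converted cells in a visited set and a remaining-negatives counter checked at the end.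
import Mathlib
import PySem

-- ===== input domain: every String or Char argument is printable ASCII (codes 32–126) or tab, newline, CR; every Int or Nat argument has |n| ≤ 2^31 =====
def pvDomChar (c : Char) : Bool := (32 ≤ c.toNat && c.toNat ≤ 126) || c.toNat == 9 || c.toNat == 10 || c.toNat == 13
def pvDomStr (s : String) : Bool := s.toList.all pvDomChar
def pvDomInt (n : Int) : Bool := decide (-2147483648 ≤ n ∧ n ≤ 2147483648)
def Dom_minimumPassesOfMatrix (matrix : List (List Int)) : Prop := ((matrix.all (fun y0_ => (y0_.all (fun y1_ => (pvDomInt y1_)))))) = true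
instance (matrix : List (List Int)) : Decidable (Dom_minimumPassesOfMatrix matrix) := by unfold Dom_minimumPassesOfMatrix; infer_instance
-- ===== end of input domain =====

-- B differs from A structurally (iterative level loop, no matrix mutation, a visited set and a
-- remaining-negatives counter instead of in-place negation plus a final rescan); A mutates its
-- argument in place (negates cells), B does not — the equivalence proved here is about the RETURN value.

-- ===== PORT A =====
-- matrix cell read matrix[i][j] (indices proved in range before use; default never observed under Pre_)
def pvGet (m : List (List Int)) (i j : Nat) : Int := (m.getD i []).getD j 0

def pvG (m : List (List Int)) (r c : Int) : Int := pvGet m r.toNat c.toNat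

-- matrix[r][c] = v  (in-place write, modelled functionally)
def pvSetC (m : List (List Int)) (r c : Int) (v : Int) : List (List Int) :=
  m.set r.toNat ((m.getD r.toNat []).set c.toNat v)

def pvSteps : List (Int × Int) := [(0, 1), (0, -1), (1, 0), (-1, 0)]

-- body of the inner `for r, c in steps` loop of A, state = (matrix, appended cells)
def pvANbr (rows cols : Int) (cell : Int × Int) (st2 : List (List Int) × List (Int × Int))
    (rc : Int × Int) : List (List Int) × List (Int × Int) :=
  -- new_row = cell.1 + rc.1, new_col = cell.2 + rc.2 (written inline)
  if ¬(0 ≤ cell.1 + rc.1 ∧ cell.1 + rc.1 < rows) ∨ ¬(0 ≤ cell.2 + rc.2 ∧ cell.2 + rc.2 < cols) then st2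
  else if 0 ≤ pvG st2.1 (cell.1 + rc.1) (cell.2 + rc.2) then st2
  else (pvSetC st2.1 (cell.1 + rc.1) (cell.2 + rc.2) (pvG st2.1 (cell.1 + rc.1) (cell.2 + rc.2) * -1),
        st2.2 ++ [(cell.1 + rc.1, cell.2 + rc.2)])

-- one queue cell of A's level: the inner `for r, c in steps` loop
def pvAStep (rows cols : Int) (st : List (List Int) × List (Int × Int)) (cell : Int × Int) :
    List (List Int) × List (Int × Int) :=
  pvSteps.foldl (pvANbr rows cols cell) st

-- `for i in range(len(queue)): queue.popleft() …`: exactly the current level is consumed,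
-- the appended cells form the next level
def pvALevel (rows cols : Int) (m : List (List Int)) (q : List (Int × Int)) :
    List (List Int) × List (Int × Int) :=
  q.foldl (pvAStep rows cols) (m, [])

-- number of negative entries, the termination measure of A's recursion
def pvRowNeg (row : List Int) : Nat := (row.filter (fun x => decide (x < 0))).length
def pvNeg (m : List (List Int)) : Nat := (m.map pvRowNeg).sum

theorem pvRowNeg_set (row : List Int) (j : Nat) (v : Int) (hj : row.getD j 0 < 0) (hv : 0 ≤ v) :
    pvRowNeg (row.set j v) + 1 = pvRowNeg row := by
  induction row generalizing j with
  | nil => simp [List.getD] at hj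
  | cons a t ih =>
    cases j with
    | zero =>
      simp [List.getD] at hj
      simp [pvRowNeg, List.filter, hj, show ¬ v < 0 by omega]
    | succ j =>
      simp [List.getD] at hj
      have := ih j hj
      by_cases ha : a < 0 <;> simp [pvRowNeg, List.filter, ha] at this ⊢ <;> omega

theorem pvNeg_set (m : List (List Int)) (i : Nat) (row : List Int)
    (h : pvRowNeg row + 1 = pvRowNeg (m.getD i [])) :
    pvNeg (m.set i row) + 1 = pvNeg m := by
  induction m generalizing i with
  | nil => simp [List.getD, pvRowNeg] at h
  | cons a t ih =>
    cases i with
    | zero => simp [List.getD] at h; simp [pvNeg, List.set]; omega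
    | succ i =>
      simp [List.getD] at h
      have := ih i h
      simp [pvNeg, List.set] at this ⊢
      omega

theorem pvNeg_flip (m : List (List Int)) (r c : Int) (h : pvG m r c < 0) :
    pvNeg (pvSetC m r c (pvG m r c * -1)) + 1 = pvNeg m := by
  apply pvNeg_set
  apply pvRowNeg_set
  · exact h
  · have : pvG m r c = (m.getD r.toNat []).getD c.toNat 0 := rfl
    omega

theorem pvANbr_meas (rows cols : Int) (cell : Int × Int)
    (st2 : List (List Int) × List (Int × Int)) (rc : Int × Int) :
    pvNeg (pvANbr rows cols cell st2 rc).1 + (pvANbr rows cols cell st2 rc).2.length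
      = pvNeg st2.1 + st2.2.length := by
  unfold pvANbr
  split
  · rfl
  · split
    · rfl
    · rename_i h1 h2
      have hf := pvNeg_flip st2.1 (cell.1 + rc.1) (cell.2 + rc.2) (by omega)
      simp only [List.length_append, List.length_cons, List.length_nil]
      omega

theorem pvANbr_fold_meas (rows cols : Int) (cell : Int × Int) (l : List (Int × Int)) :
    ∀ st : List (List Int) × List (Int × Int),
    pvNeg (l.foldl (pvANbr rows cols cell) st).1 + (l.foldl (pvANbr rows cols cell) st).2.length
      = pvNeg st.1 + st.2.length := by
  induction l with
  | nil => intro st; rfl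
  | cons x t ih =>
    intro st
    rw [List.foldl_cons]
    rw [ih (pvANbr rows cols cell st x)]
    exact pvANbr_meas rows cols cell st x

theorem pvAStep_meas (rows cols : Int) (st : List (List Int) × List (Int × Int))
    (cell : Int × Int) :
    pvNeg (pvAStep rows cols st cell).1 + (pvAStep rows cols st cell).2.length
      = pvNeg st.1 + st.2.length :=
  pvANbr_fold_meas rows cols cell pvSteps st

theorem pvALevel_meas (rows cols : Int) (q : List (Int × Int)) (m : List (List Int))
    (acc : List (Int × Int)) :
    pvNeg (q.foldl (pvAStep rows cols) (m, acc)).1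
      + (q.foldl (pvAStep rows cols) (m, acc)).2.length
      = pvNeg m + acc.length := by
  induction q generalizing m acc with
  | nil => simp
  | cons x t ih =>
    rw [List.foldl_cons]
    have h1 := pvAStep_meas rows cols (m, acc) x
    have h2 := ih (pvAStep rows cols (m, acc) x).1 (pvAStep rows cols (m, acc) x).2
    simp only [Prod.mk.eta] at h2
    dsimp only at h1
    omega

-- A's recursive helper; state = (matrix, queue), returns (passes, final matrix)
def pvAHelper (rows cols : Int) (m : List (List Int)) (q : List (Int × Int)) (passes : Int) :
    Int × List (List Int) :=
  if h : q = [] then (passes, m)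
  else
    let p := pvALevel rows cols m q
    pvAHelper rows cols p.1 p.2 (passes + 1)
termination_by pvNeg m * 2 + (if q = [] then 0 else 1)
decreasing_by
  have hm := pvALevel_meas rows cols q m []
  simp only [pvALevel, List.length_nil, Nat.add_zero] at hm ⊢
  simp only [if_neg h]
  by_cases h2 : (List.foldl (pvAStep rows cols) (m, []) q).2 = []
  · simp only [h2, List.length_nil] at hm
    simp [h2]
    omega
  · have := List.length_pos_of_ne_nil h2
    simp [h2]
    omega

def minimumPassesOfMatrix (matrix : List (List Int)) : Int :=
  let rows := matrix.length
  let cols := (matrix.headD []).length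
  let queue := (List.range rows).foldl (fun acc row =>
      (List.range cols).foldl (fun acc2 col =>
        if pvGet matrix row col ≤ 0 then acc2
        else acc2 ++ [((row : Int), (col : Int))]) acc) []
  let p := pvAHelper (rows : Int) (cols : Int) matrix queue (-1)
  if (List.range rows).any (fun row => (List.range cols).any (fun col => pvGet p.2 row col < 0))
  then -1 else p.1

-- ===== PORT B =====
-- the four neighbours of a cell, in B's order
def pvBNbrs (cell : Int × Int) : List (Int × Int) :=
  [(cell.1, cell.2 + 1), (cell.1, cell.2 - 1), (cell.1 + 1, cell.2), (cell.1 - 1, cell.2)]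

-- body of B's inner neighbour loop; state = (nxt, converted, remaining)
def pvBNbr (rows cols : Int) (matrix : List (List Int))
    (st2 : List (Int × Int) × PySem.Set (Int × Int) × Int) (n : Int × Int) :
    List (Int × Int) × PySem.Set (Int × Int) × Int :=
  if (0 ≤ n.1 ∧ n.1 < rows) ∧ (0 ≤ n.2 ∧ n.2 < cols) ∧ pvG matrix n.1 n.2 < 0
      ∧ PySem.Set.contains st2.2.1 n = false then
    (st2.1 ++ [n], PySem.Set.add st2.2.1 n, st2.2.2 - 1)
  else st2

-- one frontier cell of B's level
def pvBStep (rows cols : Int) (matrix : List (List Int))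
    (st : List (Int × Int) × PySem.Set (Int × Int) × Int) (cell : Int × Int) :
    List (Int × Int) × PySem.Set (Int × Int) × Int :=
  (pvBNbrs cell).foldl (pvBNbr rows cols matrix) st

-- termination measure for B's while loop: the in-bounds negative cells not yet converted
def pvNegCells (rows cols : Int) (matrix : List (List Int)) : List (Int × Int) :=
  (List.range rows.toNat).flatMap (fun r => (List.range cols.toNat).filterMap (fun c =>
    if pvGet matrix r c < 0 then some ((r : Int), (c : Int)) else none))

def pvMu (rows cols : Int) (matrix : List (List Int)) (conv : List (Int × Int)) : Nat :=
  ((pvNegCells rows cols matrix).filter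
    (fun x => PySem.Set.contains conv x = false)).length

theorem pvNegCells_nodup (rows cols : Int) (matrix : List (List Int)) :
    (pvNegCells rows cols matrix).Nodup := by
  unfold pvNegCells
  rw [List.nodup_flatMap]
  constructor
  · intro r _
    apply List.Nodup.filterMap
    · intro c c' y hc hc'
      split at hc <;> split at hc' <;>
        simp_all only [Option.mem_def, Option.some.injEq, reduceCtorEq]
      rw [← hc'] at hc
      simp only [Prod.mk.injEq] at hc
      omega
    · exact List.nodup_range
  · apply List.Pairwise.imp _ (List.pairwise_lt_range)
    intro r r' hlt
    intro x hx hx'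
    simp only [List.mem_filterMap, List.mem_range] at hx hx'
    obtain ⟨c, _, hc⟩ := hx
    obtain ⟨c', _, hc'⟩ := hx'
    split at hc <;> split at hc' <;>
      simp_all only [Option.mem_def, Option.some.injEq, reduceCtorEq]
    rw [← hc'] at hc
    simp only [Prod.mk.injEq] at hc
    omega

theorem mem_pvNegCells (rows cols : Int) (matrix : List (List Int)) (x : Int × Int) :
    x ∈ pvNegCells rows cols matrix ↔
      (0 ≤ x.1 ∧ x.1 < rows) ∧ (0 ≤ x.2 ∧ x.2 < cols) ∧ pvG matrix x.1 x.2 < 0 := by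
  unfold pvNegCells pvG
  simp only [List.mem_flatMap, List.mem_filterMap, List.mem_range]
  constructor
  · rintro ⟨r, hr, c, hc, heq⟩
    split at heq
    · rename_i hneg
      injection heq with heq
      subst heq
      simp only [Int.toNat_natCast]
      refine ⟨⟨by omega, by omega⟩, ⟨by omega, by omega⟩, hneg⟩
    · exact absurd heq (by simp)
  · rintro ⟨⟨h1, h2⟩, ⟨h3, h4⟩, h5⟩
    refine ⟨x.1.toNat, by omega, x.2.toNat, by omega, ?_⟩
    rw [if_pos h5]
    rw [Int.toNat_of_nonneg h1, Int.toNat_of_nonneg h3]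

theorem pv_contains_false {α : Type} [BEq α] [LawfulBEq α] (s : List α) (x : α) :
    PySem.Set.contains s x = false ↔ x ∉ s := by
  rw [← Bool.not_eq_true, PySem.Set.contains_iff]

theorem pvFilterDrop {α : Type} :
    ∀ (L : List α) (p q : α → Bool) (n : α),
    L.Nodup → n ∈ L → p n = true → q n = false → (∀ x ∈ L, x ≠ n → q x = p x) →
    (L.filter q).length + 1 = (L.filter p).length := by
  intro L
  induction L with
  | nil => intro p q n _ hn; cases hn
  | cons a t ih =>
    intro p q n hL hn hpn hqn hag
    rcases List.mem_cons.mp hn with rfl | hnt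
    · have hnot : n ∉ t := (List.nodup_cons.mp hL).1
      have hft : t.filter q = t.filter p :=
        List.filter_congr (fun x hx =>
          hag x (List.mem_cons_of_mem _ hx) (fun h => hnot (h ▸ hx)))
      simp [List.filter_cons, hpn, hqn, hft]
    · have hne : a ≠ n := by
        intro h; exact (List.nodup_cons.mp hL).1 (h ▸ hnt)
      have hqa : q a = p a := hag a List.mem_cons_self hne
      have := ih p q n (List.nodup_cons.mp hL).2 hnt hpn hqn
        (fun x hx hxn => hag x (List.mem_cons_of_mem _ hx) hxn)
      simp only [List.filter_cons, hqa]
      cases hpa : p a <;> simp [hpa]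
      · exact this
      · omega

theorem pvMu_add (rows cols : Int) (matrix : List (List Int)) (conv : List (Int × Int))
    (n : Int × Int) (hn : n ∈ pvNegCells rows cols matrix)
    (hc : PySem.Set.contains conv n = false) :
    pvMu rows cols matrix (PySem.Set.add conv n) + 1 = pvMu rows cols matrix conv := by
  unfold pvMu
  have hnm : n ∉ conv := (pv_contains_false conv n).mp hc
  have hadd : PySem.Set.add conv n = conv ++ [n] := by
    simp [PySem.Set.add, hc, hnm]
  rw [hadd]
  apply pvFilterDrop _ _ _ n (pvNegCells_nodup rows cols matrix) hn
  · simp [hc, hnm]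
  · simp only [decide_eq_false_iff_not]
    intro hcontra
    rw [pv_contains_false] at hcontra
    exact hcontra (by simp)
  · intro x hx hne
    simp only [decide_eq_decide]
    rw [pv_contains_false, pv_contains_false]
    simp [hne]

theorem pvBNbr_meas (rows cols : Int) (matrix : List (List Int))
    (st2 : List (Int × Int) × PySem.Set (Int × Int) × Int) (n : Int × Int) :
    pvMu rows cols matrix (pvBNbr rows cols matrix st2 n).2.1
        + (pvBNbr rows cols matrix st2 n).1.length
      = pvMu rows cols matrix st2.2.1 + st2.1.length := by
  unfold pvBNbr
  split
  · rename_i hcond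
    have hn : n ∈ pvNegCells rows cols matrix := by
      rw [mem_pvNegCells]
      exact ⟨hcond.1, hcond.2.1, hcond.2.2.1⟩
    have := pvMu_add rows cols matrix st2.2.1 n hn hcond.2.2.2
    simp only [List.length_append, List.length_cons, List.length_nil]
    omega
  · rfl

theorem pvBNbr_fold_meas (rows cols : Int) (matrix : List (List Int))
    (l : List (Int × Int)) :
    ∀ st : List (Int × Int) × PySem.Set (Int × Int) × Int,
    pvMu rows cols matrix (l.foldl (pvBNbr rows cols matrix) st).2.1
        + (l.foldl (pvBNbr rows cols matrix) st).1.length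
      = pvMu rows cols matrix st.2.1 + st.1.length := by
  induction l with
  | nil => intro st; rfl
  | cons x t ih =>
    intro st
    rw [List.foldl_cons, ih (pvBNbr rows cols matrix st x)]
    exact pvBNbr_meas rows cols matrix st x

theorem pvBStep_fold_meas (rows cols : Int) (matrix : List (List Int))
    (q : List (Int × Int)) :
    ∀ st : List (Int × Int) × PySem.Set (Int × Int) × Int,
    pvMu rows cols matrix (q.foldl (pvBStep rows cols matrix) st).2.1
        + (q.foldl (pvBStep rows cols matrix) st).1.length
      = pvMu rows cols matrix st.2.1 + st.1.length := by
  induction q with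
  | nil => intro st; rfl
  | cons x t ih =>
    intro st
    rw [List.foldl_cons, ih (pvBStep rows cols matrix st x)]
    exact pvBNbr_fold_meas rows cols matrix (pvBNbrs x) st

-- B's while loop; returns (passes, remaining)
def pvBLoop (rows cols : Int) (matrix : List (List Int)) (frontier : List (Int × Int))
    (conv : PySem.Set (Int × Int)) (rem : Int) (passes : Int) : Int × Int :=
  if h : frontier = [] then (passes, rem)
  else
    let st := frontier.foldl (pvBStep rows cols matrix) ([], conv, rem)
    pvBLoop rows cols matrix st.1 st.2.1 st.2.2 (passes + 1)
termination_by pvMu rows cols matrix conv * 2 + (if frontier = [] then 0 else 1)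
decreasing_by
  have hm := pvBStep_fold_meas rows cols matrix frontier ([], conv, rem)
  simp only [List.length_nil, Nat.add_zero] at hm ⊢
  simp only [if_neg h]
  by_cases h2 : (frontier.foldl (pvBStep rows cols matrix) ([], conv, rem)).1 = []
  · simp only [h2, List.length_nil] at hm
    simp [h2]
    omega
  · have := List.length_pos_of_ne_nil h2
    simp [h2]
    omega

def minimumPassesOfMatrix_alt (matrix : List (List Int)) : Int :=
  let rows := matrix.length
  let cols := (matrix.headD []).length
  let frontier := (List.range rows).flatMap (fun r =>
    (List.range cols).filterMap (fun c =>
      if 0 < pvGet matrix r c then some ((r : Int), (c : Int)) else none))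
  let remaining : Int :=
    (((List.range rows).map (fun r =>
      ((List.range cols).filter (fun c => pvGet matrix r c < 0)).length)).sum : Nat)
  let p := pvBLoop (rows : Int) (cols : Int) matrix frontier PySem.Set.empty remaining (-1)
  if p.2 = 0 then p.1 else -1

-- ===== PRECONDITION & SPEC =====
-- Pre_ excludes exactly the inputs where BOTH programs raise IndexError: the empty matrix
-- (matrix[0]) and matrices with a row shorter than the first row (matrix[row][col] during seeding).
def Pre_minimumPassesOfMatrix (matrix : List (List Int)) : Prop :=
  matrix ≠ [] ∧ ∀ row ∈ matrix, (matrix.headD []).length ≤ row.length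
instance (matrix : List (List Int)) : Decidable (Pre_minimumPassesOfMatrix matrix) := by
  unfold Pre_minimumPassesOfMatrix; infer_instance

def pvWitness_minimumPassesOfMatrix : List (List Int) := [[1, -1], [-2, -3]]

def Spec_minimumPassesOfMatrix (matrix : List (List Int)) (out : Int) : Prop := out = minimumPassesOfMatrix_alt matrix
instance (matrix : List (List Int)) (out : Int) : Decidable (Spec_minimumPassesOfMatrix matrix out) := by unfold Spec_minimumPassesOfMatrix; infer_instance

-- ===== CLAIM (what is proved, stated in full; the proofs are below) =====
def Claim_equal_minimumPassesOfMatrix : Prop := ∀ (matrix : List (List Int)), Dom_minimumPassesOfMatrix matrix → Pre_minimumPassesOfMatrix matrix → Spec_minimumPassesOfMatrix matrix (minimumPassesOfMatrix matrix)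

-- ===== LEMMAS AND PROOFS =====

-- abbreviations used throughout: rows = matrix.length, cols = (matrix.headD []).length

-- the simulation invariant: A's mutated matrix m agrees with the original matrix
-- except that the cells in S (B's converted set) are negated
def pvRel (matrix m : List (List Int)) (S : List (Int × Int)) : Prop :=
  ∀ r c : Nat, r < matrix.length → c < (matrix.headD []).length →
    pvGet m r c = if ((r : Int), (c : Int)) ∈ S then -(pvGet matrix r c) else pvGet matrix r c

def pvLen (matrix m : List (List Int)) : Prop :=
  m.length = matrix.length ∧ ∀ i : Nat, (m.getD i []).length = (matrix.getD i []).length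

def pvGood (matrix : List (List Int)) (S : List (Int × Int)) : Prop :=
  S.Nodup ∧ ∀ x ∈ S,
    x ∈ pvNegCells (matrix.length : Int) ((matrix.headD []).length : Int) matrix

def pvInv (matrix m : List (List Int)) (S : List (Int × Int)) (rem : Int) : Prop :=
  pvRel matrix m S ∧ pvLen matrix m ∧ pvGood matrix S ∧
  rem = (pvMu (matrix.length : Int) ((matrix.headD []).length : Int) matrix S : Int)

theorem pvGetD_set_row (m : List (List Int)) (i k : Nat) (row : List Int) :
    (m.set i row).getD k [] = if i = k ∧ i < m.length then row else m.getD k [] := by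
  rw [List.getD_eq_getElem?_getD, List.getElem?_set]
  by_cases hik : i = k
  · subst hik
    by_cases hlt : i < m.length
    · simp [hlt]
    · simp [hlt, List.getD_eq_getElem?_getD, List.getElem?_eq_none (Nat.le_of_not_lt hlt)]
  · simp [hik, List.getD_eq_getElem?_getD]

theorem pvGetD_set_val (row : List Int) (j c : Nat) (v : Int) :
    (row.set j v).getD c 0 = if j = c ∧ j < row.length then v else row.getD c 0 := by
  rw [List.getD_eq_getElem?_getD, List.getElem?_set]
  by_cases hjc : j = c
  · subst hjc
    by_cases hlt : j < row.length
    · simp [hlt]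
    · simp [hlt, List.getD_eq_getElem?_getD]
  · simp [hjc, List.getD_eq_getElem?_getD]

theorem pvGet_set (m : List (List Int)) (i j : Nat) (v : Int) (r c : Nat)
    (hi : i < m.length) (hj : j < (m.getD i []).length) :
    pvGet (m.set i ((m.getD i []).set j v)) r c
      = if i = r ∧ j = c then v else pvGet m r c := by
  unfold pvGet
  rw [pvGetD_set_row]
  by_cases hir : i = r
  · subst hir
    rw [if_pos ⟨rfl, hi⟩, pvGetD_set_val]
    by_cases hjc : j = c
    · subst hjc
      rw [if_pos ⟨rfl, hj⟩, if_pos ⟨rfl, rfl⟩]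
    · rw [if_neg (by tauto), if_neg (by tauto)]
  · rw [if_neg (by tauto), if_neg (by tauto)]

theorem pvLen_set (matrix m : List (List Int)) (i j : Nat) (v : Int)
    (h : pvLen matrix m) :
    pvLen matrix (m.set i ((m.getD i []).set j v)) := by
  obtain ⟨h1, h2⟩ := h
  refine ⟨by simpa using h1, fun k => ?_⟩
  rw [pvGetD_set_row]
  by_cases hik : i = k ∧ i < m.length
  · rw [if_pos hik, List.length_set, ← hik.1]
    exact h2 i
  · rw [if_neg hik]
    exact h2 k

theorem pv_getD_mem (matrix : List (List Int)) (i : Nat) (hi : i < matrix.length) :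
    matrix.getD i [] ∈ matrix := by
  rw [List.getD_eq_getElem?_getD, List.getElem?_eq_getElem hi]
  exact List.getElem_mem hi

theorem pvRel_flip (matrix m : List (List Int)) (S : List (Int × Int)) (n : Int × Int)
    (hrel : pvRel matrix m S) (hlen : pvLen matrix m)
    (hpre : ∀ row ∈ matrix, (matrix.headD []).length ≤ row.length)
    (hb1 : 0 ≤ n.1) (hb2 : n.1 < (matrix.length : Int))
    (hb3 : 0 ≤ n.2) (hb4 : n.2 < ((matrix.headD []).length : Int))
    (hns : n ∉ S) :
    pvRel matrix (pvSetC m n.1 n.2 (pvG m n.1 n.2 * -1)) (S ++ [n]) := by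
  have hi : n.1.toNat < m.length := by
    rw [hlen.1]; omega
  have hj : n.2.toNat < (m.getD n.1.toNat []).length := by
    rw [hlen.2]
    have := hpre _ (pv_getD_mem matrix n.1.toNat (by omega))
    omega
  intro r c hr hc
  unfold pvSetC
  rw [pvGet_set m n.1.toNat n.2.toNat _ r c hi hj]
  have hvm : pvG m n.1 n.2 = pvGet m n.1.toNat n.2.toNat := rfl
  by_cases hrc : n.1.toNat = r ∧ n.2.toNat = c
  · rw [if_pos hrc]
    have hn_eq : ((r : Int), (c : Int)) = n := by
      obtain ⟨e1, e2⟩ := hrc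
      obtain ⟨n1, n2⟩ := n
      simp only [Prod.mk.injEq]
      constructor <;> omega
    rw [if_pos (by simp [hn_eq])]
    rw [hvm, hrc.1, hrc.2, hrel r c hr hc, if_neg (hn_eq ▸ hns)]
    ring
  · rw [if_neg hrc]
    have hmm : (((r : Int), (c : Int)) ∈ S ++ [n]) ↔ (((r : Int), (c : Int)) ∈ S) := by
      simp only [List.mem_append, List.mem_singleton, or_iff_left_iff_imp]
      intro he
      exfalso
      apply hrc
      rw [← he]
      constructor <;> simp
    rw [hrel r c hr hc]
    by_cases hmem : ((r : Int), (c : Int)) ∈ S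
    · rw [if_pos hmem, if_pos (hmm.mpr hmem)]
    · rw [if_neg hmem, if_neg (fun h => hmem (hmm.mp h))]

theorem pvNbr_sim (matrix : List (List Int))
    (hpre : ∀ row ∈ matrix, (matrix.headD []).length ≤ row.length)
    (m : List (List Int)) (S : List (Int × Int)) (rem : Int) (out : List (Int × Int))
    (cell rc : Int × Int)
    (hinv : pvInv matrix m S rem) :
    (pvANbr (matrix.length : Int) ((matrix.headD []).length : Int) cell (m, out) rc).2
      = (pvBNbr (matrix.length : Int) ((matrix.headD []).length : Int) matrix (out, S, rem)
          (cell.1 + rc.1, cell.2 + rc.2)).1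
    ∧ pvInv matrix
        (pvANbr (matrix.length : Int) ((matrix.headD []).length : Int) cell (m, out) rc).1
        (pvBNbr (matrix.length : Int) ((matrix.headD []).length : Int) matrix (out, S, rem)
          (cell.1 + rc.1, cell.2 + rc.2)).2.1
        (pvBNbr (matrix.length : Int) ((matrix.headD []).length : Int) matrix (out, S, rem)
          (cell.1 + rc.1, cell.2 + rc.2)).2.2 := by
  obtain ⟨hrel, hlen, hgood, hrem⟩ := hinv
  unfold pvANbr pvBNbr
  dsimp only
  by_cases hb : (0 ≤ cell.1 + rc.1 ∧ cell.1 + rc.1 < (matrix.length : Int))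
      ∧ (0 ≤ cell.2 + rc.2 ∧ cell.2 + rc.2 < ((matrix.headD []).length : Int))
  · rw [if_neg (by tauto)]
    have hval : pvG m (cell.1 + rc.1) (cell.2 + rc.2)
        = (if ((cell.1 + rc.1), (cell.2 + rc.2)) ∈ S
            then -(pvG matrix (cell.1 + rc.1) (cell.2 + rc.2))
            else pvG matrix (cell.1 + rc.1) (cell.2 + rc.2)) := by
      have h := hrel (cell.1 + rc.1).toNat (cell.2 + rc.2).toNat (by omega) (by omega)
      unfold pvG
      rw [Int.toNat_of_nonneg hb.1.1, Int.toNat_of_nonneg hb.2.1] at h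
      exact h
    by_cases hmem : ((cell.1 + rc.1), (cell.2 + rc.2)) ∈ S
    · have hnegS : pvG matrix (cell.1 + rc.1) (cell.2 + rc.2) < 0 := by
        have h := hgood.2 _ hmem
        rw [mem_pvNegCells] at h
        exact h.2.2
      rw [if_pos (by rw [hval, if_pos hmem]; omega)]
      rw [if_neg (fun hcond => by
        have h := hcond.2.2.2
        rw [pv_contains_false] at h
        exact h hmem)]
      exact ⟨rfl, hrel, hlen, hgood, hrem⟩
    · by_cases hneg : pvG matrix (cell.1 + rc.1) (cell.2 + rc.2) < 0
      · rw [if_neg (by rw [hval, if_neg hmem]; omega)]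
        rw [if_pos ⟨hb.1, hb.2, hneg, (pv_contains_false _ _).mpr hmem⟩]
        have hcells : ((cell.1 + rc.1), (cell.2 + rc.2))
            ∈ pvNegCells (matrix.length : Int) ((matrix.headD []).length : Int) matrix := by
          rw [mem_pvNegCells]
          exact ⟨⟨hb.1.1, hb.1.2⟩, ⟨hb.2.1, hb.2.2⟩, hneg⟩
        have hadd : PySem.Set.add S ((cell.1 + rc.1), (cell.2 + rc.2))
            = S ++ [((cell.1 + rc.1), (cell.2 + rc.2))] := by
          simp [PySem.Set.add, (pv_contains_false _ _).mpr hmem, hmem]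
        refine ⟨rfl, ?_, ?_, ?_, ?_⟩
        · dsimp only
          rw [hadd]
          exact pvRel_flip matrix m S _ hrel hlen hpre hb.1.1 hb.1.2 hb.2.1 hb.2.2 hmem
        · unfold pvSetC
          exact pvLen_set matrix m _ _ _ hlen
        · constructor
          · dsimp only
            rw [hadd]
            have hd : ∀ a ∈ S, ∀ b ∈ [((cell.1 + rc.1), (cell.2 + rc.2))], a ≠ b := by
              intro x hx b hb
              simp only [List.mem_singleton] at hb
              subst hb
              intro hx2
              exact hmem (hx2 ▸ hx)
            exact (List.nodup_append).mpr ⟨hgood.1, List.nodup_singleton _, hd⟩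
          · intro x hx
            dsimp only at hx
            rw [PySem.Set.mem_add] at hx
            rcases hx with hx | hx
            · exact hgood.2 x hx
            · rw [hx]
              exact hcells
        · dsimp only
          have hmu := pvMu_add (matrix.length : Int) ((matrix.headD []).length : Int)
            matrix S _ hcells ((pv_contains_false _ _).mpr hmem)
          omega
      · rw [if_pos (by rw [hval, if_neg hmem]; omega)]
        rw [if_neg (fun hcond => hneg hcond.2.2.1)]
        exact ⟨rfl, hrel, hlen, hgood, hrem⟩
  · rw [if_pos (by tauto)]
    rw [if_neg (by tauto)]
    exact ⟨rfl, hrel, hlen, hgood, hrem⟩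

theorem pvNbrs_fold_sim (matrix : List (List Int))
    (hpre : ∀ row ∈ matrix, (matrix.headD []).length ≤ row.length) :
    ∀ (l : List (Int × Int)) (cell : Int × Int) (m : List (List Int))
      (S : List (Int × Int)) (rem : Int) (out : List (Int × Int)),
    pvInv matrix m S rem →
    (l.foldl (pvANbr (matrix.length : Int) ((matrix.headD []).length : Int) cell) (m, out)).2
      = ((l.map (fun rc => (cell.1 + rc.1, cell.2 + rc.2))).foldl
          (pvBNbr (matrix.length : Int) ((matrix.headD []).length : Int) matrix) (out, S, rem)).1
    ∧ pvInv matrix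
        (l.foldl (pvANbr (matrix.length : Int) ((matrix.headD []).length : Int) cell) (m, out)).1
        ((l.map (fun rc => (cell.1 + rc.1, cell.2 + rc.2))).foldl
          (pvBNbr (matrix.length : Int) ((matrix.headD []).length : Int) matrix) (out, S, rem)).2.1
        ((l.map (fun rc => (cell.1 + rc.1, cell.2 + rc.2))).foldl
          (pvBNbr (matrix.length : Int) ((matrix.headD []).length : Int) matrix) (out, S, rem)).2.2 := by
  intro l
  induction l with
  | nil => intro cell m S rem out h; exact ⟨rfl, h⟩
  | cons rc t ih =>
    intro cell m S rem out h
    rw [List.map_cons, List.foldl_cons, List.foldl_cons]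
    obtain ⟨heq, hinv'⟩ := pvNbr_sim matrix hpre m S rem out cell rc h
    have hpair : pvANbr (matrix.length : Int) ((matrix.headD []).length : Int) cell (m, out) rc
        = ((pvANbr (matrix.length : Int) ((matrix.headD []).length : Int) cell (m, out) rc).1,
           (pvBNbr (matrix.length : Int) ((matrix.headD []).length : Int) matrix (out, S, rem)
             (cell.1 + rc.1, cell.2 + rc.2)).1) := by
      rw [← heq]
    rw [hpair]
    exact ih cell
      (pvANbr (matrix.length : Int) ((matrix.headD []).length : Int) cell (m, out) rc).1
      (pvBNbr (matrix.length : Int) ((matrix.headD []).length : Int) matrix (out, S, rem)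
        (cell.1 + rc.1, cell.2 + rc.2)).2.1
      (pvBNbr (matrix.length : Int) ((matrix.headD []).length : Int) matrix (out, S, rem)
        (cell.1 + rc.1, cell.2 + rc.2)).2.2
      (pvBNbr (matrix.length : Int) ((matrix.headD []).length : Int) matrix (out, S, rem)
        (cell.1 + rc.1, cell.2 + rc.2)).1
      hinv'

theorem pvBNbrs_map (cell : Int × Int) :
    pvBNbrs cell = pvSteps.map (fun rc => (cell.1 + rc.1, cell.2 + rc.2)) := by
  simp [pvBNbrs, pvSteps, sub_eq_add_neg]

theorem pvLevel_sim (matrix : List (List Int))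
    (hpre : ∀ row ∈ matrix, (matrix.headD []).length ≤ row.length) :
    ∀ (q : List (Int × Int)) (m : List (List Int)) (S : List (Int × Int)) (rem : Int)
      (out : List (Int × Int)),
    pvInv matrix m S rem →
    (q.foldl (pvAStep (matrix.length : Int) ((matrix.headD []).length : Int)) (m, out)).2
      = (q.foldl (pvBStep (matrix.length : Int) ((matrix.headD []).length : Int) matrix)
          (out, S, rem)).1
    ∧ pvInv matrix
        (q.foldl (pvAStep (matrix.length : Int) ((matrix.headD []).length : Int)) (m, out)).1
        (q.foldl (pvBStep (matrix.length : Int) ((matrix.headD []).length : Int) matrix)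
          (out, S, rem)).2.1
        (q.foldl (pvBStep (matrix.length : Int) ((matrix.headD []).length : Int) matrix)
          (out, S, rem)).2.2 := by
  intro q
  induction q with
  | nil => intro m S rem out h; exact ⟨rfl, h⟩
  | cons cell t ih =>
    intro m S rem out h
    rw [List.foldl_cons, List.foldl_cons]
    have hstep : (pvAStep (matrix.length : Int) ((matrix.headD []).length : Int) (m, out) cell).2
        = (pvBStep (matrix.length : Int) ((matrix.headD []).length : Int) matrix (out, S, rem) cell).1
      ∧ pvInv matrix
        (pvAStep (matrix.length : Int) ((matrix.headD []).length : Int) (m, out) cell).1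
        (pvBStep (matrix.length : Int) ((matrix.headD []).length : Int) matrix (out, S, rem) cell).2.1
        (pvBStep (matrix.length : Int) ((matrix.headD []).length : Int) matrix (out, S, rem) cell).2.2 := by
      unfold pvAStep pvBStep
      rw [pvBNbrs_map]
      exact pvNbrs_fold_sim matrix hpre pvSteps cell m S rem out h
    obtain ⟨heq, hinv'⟩ := hstep
    have hpair : pvAStep (matrix.length : Int) ((matrix.headD []).length : Int) (m, out) cell
        = ((pvAStep (matrix.length : Int) ((matrix.headD []).length : Int) (m, out) cell).1,
           (pvBStep (matrix.length : Int) ((matrix.headD []).length : Int) matrix (out, S, rem) cell).1) := by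
      rw [← heq]
    rw [hpair]
    exact ih
      (pvAStep (matrix.length : Int) ((matrix.headD []).length : Int) (m, out) cell).1
      (pvBStep (matrix.length : Int) ((matrix.headD []).length : Int) matrix (out, S, rem) cell).2.1
      (pvBStep (matrix.length : Int) ((matrix.headD []).length : Int) matrix (out, S, rem) cell).2.2
      (pvBStep (matrix.length : Int) ((matrix.headD []).length : Int) matrix (out, S, rem) cell).1
      hinv' 

theorem pvLoop_sim (matrix : List (List Int))
    (hpre : ∀ row ∈ matrix, (matrix.headD []).length ≤ row.length) :
    ∀ (k : Nat) (S : List (Int × Int)) (m : List (List Int)) (q : List (Int × Int))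
      (rem passes : Int),
    pvMu (matrix.length : Int) ((matrix.headD []).length : Int) matrix S ≤ k →
    pvInv matrix m S rem →
    (pvAHelper (matrix.length : Int) ((matrix.headD []).length : Int) m q passes).1
      = (pvBLoop (matrix.length : Int) ((matrix.headD []).length : Int) matrix q S rem passes).1
    ∧ ∃ S', pvInv matrix
        (pvAHelper (matrix.length : Int) ((matrix.headD []).length : Int) m q passes).2 S'
        (pvBLoop (matrix.length : Int) ((matrix.headD []).length : Int) matrix q S rem passes).2 := by
  intro k
  induction k using Nat.strong_induction_on with
  | _ k ih =>
    intro S m q rem passes hk hinv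
    by_cases hq : q = []
    · subst hq
      rw [pvAHelper, pvBLoop]
      simp only [dif_pos rfl]
      exact ⟨rfl, S, hinv⟩
    · rw [pvAHelper, pvBLoop]
      simp only [dif_neg hq]
      simp only [pvALevel]
      obtain ⟨heq, hinv'⟩ := pvLevel_sim matrix hpre q m S rem [] hinv
      by_cases hP2 : (q.foldl (pvAStep (matrix.length : Int) ((matrix.headD []).length : Int)) (m, [])).2 = []
      · have hQ1 : (q.foldl (pvBStep (matrix.length : Int) ((matrix.headD []).length : Int) matrix) ([], S, rem)).1 = [] := by
          rw [← heq]; exact hP2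
        rw [pvAHelper, pvBLoop, hP2, hQ1]
        simp only [dif_pos rfl]
        exact ⟨rfl, _, hinv'⟩
      · have hQ1 : (q.foldl (pvBStep (matrix.length : Int) ((matrix.headD []).length : Int) matrix) ([], S, rem)).1 ≠ [] := by
          rw [← heq]; exact hP2
        have hmeas := pvBStep_fold_meas (matrix.length : Int) ((matrix.headD []).length : Int) matrix q ([], S, rem)
        have hQlen := List.length_pos_of_ne_nil hQ1
        have hlt : pvMu (matrix.length : Int) ((matrix.headD []).length : Int) matrix
            (q.foldl (pvBStep (matrix.length : Int) ((matrix.headD []).length : Int) matrix) ([], S, rem)).2.1 < k := by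
          simp only [List.length_nil, Nat.add_zero] at hmeas
          omega
        have hres := ih _ hlt
          (q.foldl (pvBStep (matrix.length : Int) ((matrix.headD []).length : Int) matrix) ([], S, rem)).2.1
          (q.foldl (pvAStep (matrix.length : Int) ((matrix.headD []).length : Int)) (m, [])).1
          (q.foldl (pvAStep (matrix.length : Int) ((matrix.headD []).length : Int)) (m, [])).2
          (q.foldl (pvBStep (matrix.length : Int) ((matrix.headD []).length : Int) matrix) ([], S, rem)).2.2
          (passes + 1) le_rfl hinv'
        rw [← heq]
        exact hres

theorem pvSeed_row (matrix : List (List Int)) (r : Nat) :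
    ∀ (l : List Nat) (acc : List (Int × Int)),
    l.foldl (fun acc2 c => if pvGet matrix r c ≤ 0 then acc2 else acc2 ++ [((r : Int), (c : Int))]) acc
      = acc ++ l.filterMap (fun c => if 0 < pvGet matrix r c then some ((r : Int), (c : Int)) else none) := by
  intro l
  induction l with
  | nil => intro acc; simp
  | cons c t ih =>
    intro acc
    rw [List.foldl_cons, List.filterMap_cons]
    by_cases h : pvGet matrix r c ≤ 0
    · rw [if_pos h, if_neg (by omega)]
      exact ih acc
    · rw [if_neg h, if_pos (by omega), ih (acc ++ [((r : Int), (c : Int))])]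
      simp

theorem pvSeed_eq (matrix : List (List Int)) :
    (List.range matrix.length).foldl (fun acc row =>
      (List.range (matrix.headD []).length).foldl (fun acc2 col =>
        if pvGet matrix row col ≤ 0 then acc2 else acc2 ++ [((row : Int), (col : Int))]) acc) []
    = (List.range matrix.length).flatMap (fun r =>
        (List.range (matrix.headD []).length).filterMap (fun c =>
          if 0 < pvGet matrix r c then some ((r : Int), (c : Int)) else none)) := by
  have key : ∀ (l : List Nat) (acc : List (Int × Int)),
      l.foldl (fun acc row => (List.range (matrix.headD []).length).foldl (fun acc2 col =>
        if pvGet matrix row col ≤ 0 then acc2 else acc2 ++ [((row : Int), (col : Int))]) acc) acc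
      = acc ++ l.flatMap (fun r => (List.range (matrix.headD []).length).filterMap (fun c =>
          if 0 < pvGet matrix r c then some ((r : Int), (c : Int)) else none)) := by
    intro l
    induction l with
    | nil => intro acc; simp
    | cons r t ih =>
      intro acc
      rw [List.foldl_cons, pvSeed_row matrix r, ih, List.flatMap_cons, List.append_assoc]
  simpa using key (List.range matrix.length) []

theorem pvLenFilterMap (matrix : List (List Int)) (r : Nat) (l : List Nat) :
    (l.filterMap (fun c => if pvGet matrix r c < 0 then some ((r : Int), (c : Int)) else none)).length
      = (l.filter (fun c => pvGet matrix r c < 0)).length := by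
  induction l with
  | nil => rfl
  | cons c t ih =>
    rw [List.filterMap_cons, List.filter_cons]
    by_cases h : pvGet matrix r c < 0
    · rw [if_pos h]
      simp [h, ih]
    · rw [if_neg h]
      simp [h, ih]

theorem pvRem0 (matrix : List (List Int)) :
    ((((List.range matrix.length).map (fun r =>
        ((List.range (matrix.headD []).length).filter
          (fun c => pvGet matrix r c < 0)).length)).sum : Nat) : Int)
    = (pvMu (matrix.length : Int) ((matrix.headD []).length : Int) matrix [] : Int) := by
  have h1 : pvMu (matrix.length : Int) ((matrix.headD []).length : Int) matrix []
      = ((List.range matrix.length).map (fun r =>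
          ((List.range (matrix.headD []).length).filter
            (fun c => pvGet matrix r c < 0)).length)).sum := by
    unfold pvMu pvNegCells
    rw [List.filter_eq_self.mpr (by
      intro x _
      simp [pv_contains_false])]
    simp only [Int.toNat_natCast, List.length_flatMap]
    apply congrArg
    apply List.map_congr_left
    intro r _
    exact pvLenFilterMap matrix r _
  rw [h1]

theorem pvFinal_neg_iff (matrix mf : List (List Int)) (S' : List (Int × Int))
    (hrel : pvRel matrix mf S') (hgood : pvGood matrix S') :
    (∃ r < matrix.length, ∃ c < (matrix.headD []).length, pvGet mf r c < 0)
    ↔ pvMu (matrix.length : Int) ((matrix.headD []).length : Int) matrix S' ≠ 0 := by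
  constructor
  · rintro ⟨r, hr, c, hc, hneg⟩
    rw [hrel r c hr hc] at hneg
    by_cases hmem : ((r : Int), (c : Int)) ∈ S'
    · rw [if_pos hmem] at hneg
      have h := hgood.2 _ hmem
      rw [mem_pvNegCells] at h
      simp only [pvG, Int.toNat_natCast] at h
      omega
    · rw [if_neg hmem] at hneg
      intro h0
      unfold pvMu at h0
      rw [List.length_eq_zero_iff, List.filter_eq_nil_iff] at h0
      have hx : ((r : Int), (c : Int))
          ∈ pvNegCells (matrix.length : Int) ((matrix.headD []).length : Int) matrix := by
        rw [mem_pvNegCells]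
        refine ⟨⟨by omega, by omega⟩, ⟨by omega, by omega⟩, ?_⟩
        simpa [pvG] using hneg
      have h2 := h0 _ hx
      rw [decide_eq_true_iff, pv_contains_false] at h2
      simp only [not_not] at h2
      exact hmem h2
  · intro hmu
    have hne : ((pvNegCells (matrix.length : Int) ((matrix.headD []).length : Int) matrix).filter
        (fun x => PySem.Set.contains S' x = false)) ≠ [] := by
      intro h
      unfold pvMu at hmu
      rw [h] at hmu
      exact hmu rfl
    obtain ⟨x, hx⟩ := List.exists_mem_of_ne_nil _ hne
    have hxm := List.mem_filter.mp hx
    have hxn := hxm.1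
    have hxs : x ∉ S' := by
      have h := hxm.2
      rw [decide_eq_true_iff, pv_contains_false] at h
      exact h
    rw [mem_pvNegCells] at hxn
    refine ⟨x.1.toNat, by omega, x.2.toNat, by omega, ?_⟩
    rw [hrel _ _ (by omega) (by omega)]
    rw [Int.toNat_of_nonneg hxn.1.1, Int.toNat_of_nonneg hxn.2.1.1]
    rw [if_neg (by simpa using hxs)]
    exact hxn.2.2

-- ===== VERDICT (by name: the statement is the Claim_ definition above) =====
theorem minimumPassesOfMatrix_spec : Claim_equal_minimumPassesOfMatrix := by
  intro matrix _ hpre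
  obtain ⟨hne, hrows⟩ := hpre
  unfold Spec_minimumPassesOfMatrix minimumPassesOfMatrix minimumPassesOfMatrix_alt
  rw [show (PySem.Set.empty : PySem.Set (Int × Int)) = [] from rfl]
  simp only [pvSeed_eq]
  have hinv0 : pvInv matrix matrix []
      ((((List.range matrix.length).map (fun r =>
        ((List.range (matrix.headD []).length).filter
          (fun c => pvGet matrix r c < 0)).length)).sum : Nat) : Int) := by
    refine ⟨?_, ⟨rfl, fun _ => rfl⟩, ⟨List.nodup_nil, by simp⟩, pvRem0 matrix⟩
    intro r c _ _
    rw [if_neg (List.not_mem_nil)]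
  obtain ⟨hpass, S', hinv'⟩ := pvLoop_sim matrix hrows
    (pvMu (matrix.length : Int) ((matrix.headD []).length : Int) matrix []) [] matrix
    ((List.range matrix.length).flatMap (fun r =>
      (List.range (matrix.headD []).length).filterMap (fun c =>
        if 0 < pvGet matrix r c then some ((r : Int), (c : Int)) else none)))
    ((((List.range matrix.length).map (fun r =>
      ((List.range (matrix.headD []).length).filter
        (fun c => pvGet matrix r c < 0)).length)).sum : Nat) : Int)
    (-1) le_rfl hinv0
  obtain ⟨hrelf, _, hgoodf, hremf⟩ := hinv'
  have hiff := pvFinal_neg_iff matrix _ S' hrelf hgoodf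
  by_cases hmu : pvMu (matrix.length : Int) ((matrix.headD []).length : Int) matrix S' = 0
  · have hB2 : (pvBLoop (matrix.length : Int) ((matrix.headD []).length : Int) matrix
        ((List.range matrix.length).flatMap (fun r =>
          (List.range (matrix.headD []).length).filterMap (fun c =>
            if 0 < pvGet matrix r c then some ((r : Int), (c : Int)) else none)))
        []
        ((((List.range matrix.length).map (fun r =>
          ((List.range (matrix.headD []).length).filter
            (fun c => pvGet matrix r c < 0)).length)).sum : Nat) : Int)
        (-1)).2 = 0 := by
      rw [hremf, hmu]
      simp
    have hanyF : ((List.range matrix.length).any (fun row =>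
        (List.range (matrix.headD []).length).any (fun col =>
          pvGet (pvAHelper (matrix.length : Int) ((matrix.headD []).length : Int) matrix
            ((List.range matrix.length).flatMap (fun r =>
              (List.range (matrix.headD []).length).filterMap (fun c =>
                if 0 < pvGet matrix r c then some ((r : Int), (c : Int)) else none)))
            (-1)).2 row col < 0))) = false := by
      rw [Bool.eq_false_iff]
      intro hany
      apply (hiff.mp ?_) hmu
      simp only [List.any_eq_true, List.mem_range, decide_eq_true_iff] at hany
      obtain ⟨r, hr, c, hc, h⟩ := hany
      exact ⟨r, hr, c, hc, h⟩
    rw [hanyF, hB2, if_neg (by simp), if_pos rfl]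
    exact hpass
  · have hB2 : ¬((pvBLoop (matrix.length : Int) ((matrix.headD []).length : Int) matrix
        ((List.range matrix.length).flatMap (fun r =>
          (List.range (matrix.headD []).length).filterMap (fun c =>
            if 0 < pvGet matrix r c then some ((r : Int), (c : Int)) else none)))
        []
        ((((List.range matrix.length).map (fun r =>
          ((List.range (matrix.headD []).length).filter
            (fun c => pvGet matrix r c < 0)).length)).sum : Nat) : Int)
        (-1)).2 = 0) := by
      rw [hremf]
      exact_mod_cast hmu
    have hanyT : ((List.range matrix.length).any (fun row =>
        (List.range (matrix.headD []).length).any (fun col =>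
          pvGet (pvAHelper (matrix.length : Int) ((matrix.headD []).length : Int) matrix
            ((List.range matrix.length).flatMap (fun r =>
              (List.range (matrix.headD []).length).filterMap (fun c =>
                if 0 < pvGet matrix r c then some ((r : Int), (c : Int)) else none)))
            (-1)).2 row col < 0))) = true := by
      have h := hiff.mpr hmu
      obtain ⟨r, hr, c, hc, hlt⟩ := h
      simp only [List.any_eq_true, List.mem_range, decide_eq_true_iff]
      exact ⟨r, hr, c, hc, hlt⟩
    rw [hanyT, if_pos rfl, if_neg hB2]
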